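-- pv_equiv track=rewrite | github.com/popidol/PL | task1/task1.py | gen_arr
-- ===== SOURCE A (Python) =====
-- def gen_arr(n, m):
--     arr = [1]
--     cur = 1
--     while True:
--         next_index = (cur + m - 1) % n
--         if next_index == 0:
--             next_index = n
--         cur = next_index
--         if cur == 1:
--             break
--         arr.append(cur)
--     return arr
-- ===== SOURCE B (Python) =====
-- def gen_arr(n, m):
--     # closed form: cycle length p = n // gcd(n, step), values are residues 1+i*step mod n with 0 -> n
--     step = (m - 1) % n
--     g, b = n, step
--     while b:
--         g, b = b, g % b
--     p = n // g
--     return [((1 + i * step) % n) or n for i in range(p)]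
-- ===== Notes on version B (the rewrite author's own statement) =====
-- stated objective: simpler
-- what changed: Replaces A's iterate-until-back-to-1 while-loop by a closed form: compute the cycle length p = n // gcd(n, (m-1) % n) up front (Euclid's algorithm) and emit the i-th element directly as ((1 + i*(m-1)) % n) or n for i in range(p).
import Mathlib
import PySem

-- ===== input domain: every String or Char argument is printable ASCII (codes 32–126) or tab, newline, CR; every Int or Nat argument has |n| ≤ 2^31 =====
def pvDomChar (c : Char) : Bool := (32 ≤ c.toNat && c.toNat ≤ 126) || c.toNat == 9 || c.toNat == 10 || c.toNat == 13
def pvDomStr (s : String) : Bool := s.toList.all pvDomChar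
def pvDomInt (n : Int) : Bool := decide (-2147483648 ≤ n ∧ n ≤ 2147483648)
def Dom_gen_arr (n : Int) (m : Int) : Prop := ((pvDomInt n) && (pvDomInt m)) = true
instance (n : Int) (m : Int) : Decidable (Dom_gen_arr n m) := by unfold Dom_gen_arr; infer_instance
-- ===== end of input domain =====

-- B replaces A's iterate-until-back-to-1 loop by a closed form: cycle length n // gcd(n, (m-1) % n)
-- and the i-th value ((1 + i*(m-1)) % n) with residue 0 mapped to n (objective: simpler).

-- ===== PORT A =====
-- fuel only makes A's `while True` total; inside Pre_ the loop breaks before fuel runs out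
def genLoopA (n m : Int) : Nat → Int → List Int → List Int
  | 0, _, arr => arr
  | fuel + 1, cur, arr =>
    let ni := PySem.Int.mod (cur + m - 1) n
    let ni2 := if ni = 0 then n else ni
    if ni2 = 1 then arr else genLoopA n m fuel ni2 (arr ++ [ni2])

def gen_arr (n : Int) (m : Int) : List Int := genLoopA n m (n.toNat + 1) 1 [1]

-- ===== PORT B =====
-- Euclid's gcd loop from Source B (fuel makes the `while b:` total; it suffices since 0 ≤ b shrinks)
def euclidLoop : Nat → Int → Int → Int
  | 0, g, _ => g
  | fuel + 1, g, b => if b = 0 then g else euclidLoop fuel b (PySem.Int.mod g b)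

def gen_arr_alt (n : Int) (m : Int) : List Int :=
  let step := PySem.Int.mod (m - 1) n
  let g := euclidLoop (step.toNat + 1) n step
  let p := PySem.Int.floordiv n g
  (PySem.List.pyRange 0 p 1).map (fun i =>
    let r := PySem.Int.mod (1 + i * step) n
    if r = 0 then n else r)

-- ===== PRECONDITION & SPEC =====
-- Pre_ excludes n ≤ 0: for n = 0 A raises ZeroDivisionError, and for n < 0 A never
-- terminates (the 0↦n rule sends cur to non-positive values that can never equal 1).
def Pre_gen_arr (n : Int) (m : Int) : Prop := 1 ≤ n
instance (n : Int) (m : Int) : Decidable (Pre_gen_arr n m) := by unfold Pre_gen_arr; infer_instance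
def pvWitness_gen_arr : Int × Int := (10, 3)

def Spec_gen_arr (n : Int) (m : Int) (out : List Int) : Prop := out = gen_arr_alt n m
instance (n : Int) (m : Int) (out : List Int) : Decidable (Spec_gen_arr n m out) := by unfold Spec_gen_arr; infer_instance

-- ===== CLAIM (what is proved, stated in full; the proofs are below) =====
def Claim_equal_gen_arr : Prop := ∀ (n : Int) (m : Int), Dom_gen_arr n m → Pre_gen_arr n m → Spec_gen_arr n m (gen_arr n m)

-- ===== LEMMAS AND PROOFS =====

-- the k-th value of the cycle: residue 1 + k*s mod n, with 0 mapped to n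
def pvF (n s k : Int) : Int :=
  let r := (1 + k * s) % n
  if r = 0 then n else r

theorem pv_gcd_rec (g b : Int) : Int.gcd g b = Int.gcd b (g % b) := by
  apply Nat.dvd_antisymm
  · apply Int.dvd_gcd
    · exact Int.gcd_dvd_right g b
    · rw [Int.emod_def]
      exact dvd_sub (Int.gcd_dvd_left g b) ((Int.gcd_dvd_right g b).mul_right _)
  · apply Int.dvd_gcd
    · have he : b * (g / b) + g % b = g := by rw [Int.emod_def]; ring
      have hd := dvd_add ((Int.gcd_dvd_left b (g % b)).mul_right (g / b))
        (Int.gcd_dvd_right b (g % b))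
      rwa [he] at hd
    · exact Int.gcd_dvd_left b (g % b)

theorem pv_euclid (fuel : Nat) (g b : Int) (hg : 0 ≤ g) (hb : 0 ≤ b)
    (hf : b.toNat < fuel) : euclidLoop fuel g b = (Int.gcd g b : Int) := by
  induction fuel generalizing g b with
  | zero => omega
  | succ f ih =>
    by_cases h0 : b = 0
    · subst h0
      simp [euclidLoop, Int.gcd, Int.natAbs_of_nonneg hg]
    · have hbpos : 0 < b := by omega
      have hmod : PySem.Int.mod g b = g % b := PySem.Int.mod_eq_emod_of_pos hbpos
      have h1 : 0 ≤ g % b := Int.emod_nonneg g h0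
      have h2 : g % b < b := Int.emod_lt_of_pos g hbpos
      simp only [euclidLoop, h0, if_false, hmod]
      rw [ih b (g % b) hb h1 (by omega), ← pv_gcd_rec]

theorem pv_f_zero (n s : Int) (hn : 0 < n) : pvF n s 0 = 1 := by
  unfold pvF
  simp only [zero_mul, add_zero]
  by_cases h1 : n = 1
  · subst h1; simp
  · have : (1 : Int) % n = 1 := Int.emod_eq_of_lt (by omega) (by omega)
    simp [this]

theorem pv_f_eq_one_iff (n s k : Int) (hn : 0 < n) : pvF n s k = 1 ↔ n ∣ k * s := by
  have hdvd : (1 + k * s) % n = 1 % n ↔ n ∣ k * s := by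
    rw [Int.emod_eq_emod_iff_emod_sub_eq_zero]
    constructor
    · intro h
      have := Int.dvd_of_emod_eq_zero h
      simpa using this
    · intro h
      have : (1 + k * s - 1) = k * s := by ring
      rw [this]
      exact Int.emod_eq_zero_of_dvd h
  by_cases h1 : n = 1
  · subst h1; simp [pvF]
  · have hlt : (1 : Int) % n = 1 := Int.emod_eq_of_lt (by omega) (by omega)
    rw [← hdvd, hlt]
    unfold pvF
    have h0 : 0 ≤ (1 + k * s) % n := Int.emod_nonneg _ (by omega)
    by_cases hr : (1 + k * s) % n = 0
    · simp [hr]; omega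
    · simp [hr]

theorem pv_dvd_iff (n s k : Int) (hn : 0 < n) (hs : 0 ≤ s) :
    n ∣ k * s ↔ (n / (Int.gcd n s : Int)) ∣ k := by
  set G : Int := (Int.gcd n s : Int) with hG
  have hGpos : 0 < Int.gcd n s := Int.gcd_pos_of_ne_zero_left s (by omega)
  have hGpos' : (0:Int) < G := by rw [hG]; exact_mod_cast hGpos
  have hGn : G ∣ n := Int.gcd_dvd_left n s
  have hGs : G ∣ s := Int.gcd_dvd_right n s
  obtain ⟨p, hp⟩ := hGn
  obtain ⟨s', hs'⟩ := hGs
  have hpe : n / G = p := by rw [hp]; exact Int.mul_ediv_cancel_left p (by omega)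
  have hse : s / G = s' := by rw [hs']; exact Int.mul_ediv_cancel_left s' (by omega)
  have hcop : Int.gcd p s' = 1 := by
    have := Int.gcd_ediv_gcd_ediv_gcd (i := n) (j := s) hGpos
    rwa [← hG, hpe, hse] at this
  have hcop' : IsCoprime p s' := Int.isCoprime_iff_gcd_eq_one.mpr hcop
  rw [hpe]
  constructor
  · intro h
    rw [hp, hs'] at h
    have h2 : G * p ∣ G * (k * s') := by
      have : k * (G * s') = G * (k * s') := by ring
      rwa [this] at h
    have h3 : p ∣ k * s' := (mul_dvd_mul_iff_left (by omega : G ≠ 0)).mp h2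
    exact hcop'.dvd_of_dvd_mul_right h3
  · intro h
    obtain ⟨c, hc⟩ := h
    rw [hp, hs', hc]
    exact ⟨c * s', by ring⟩

theorem pv_step (n m s k : Int) (hn : 0 < n) (hsmod : s = (m - 1) % n) :
    (pvF n s k + m - 1) % n = (1 + (k + 1) * s) % n := by
  have h1 : Int.ModEq n (pvF n s k) (1 + k * s) := by
    unfold pvF
    by_cases hr : (1 + k * s) % n = 0
    · simp only [hr, if_true]
      have hd : n ∣ 1 + k * s := Int.dvd_of_emod_eq_zero hr
      have ha : Int.ModEq n n 0 := Int.modEq_zero_iff_dvd.mpr dvd_rfl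
      have hb : Int.ModEq n (1 + k * s) 0 := Int.modEq_zero_iff_dvd.mpr hd
      exact ha.trans hb.symm
    · simp only [hr, if_false]
      unfold Int.ModEq
      exact Int.emod_emod_of_dvd _ dvd_rfl
  have h2 : Int.ModEq n (m - 1) s := by
    unfold Int.ModEq
    rw [hsmod]
    exact (Int.emod_emod_of_dvd _ dvd_rfl).symm
  have h3 : Int.ModEq n (pvF n s k + (m - 1)) (1 + k * s + s) := h1.add h2
  have h4 : pvF n s k + m - 1 = pvF n s k + (m - 1) := by ring
  have h5 : 1 + (k + 1) * s = 1 + k * s + s := by ring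
  rw [h4, h5]
  exact h3

theorem pv_loop (n m s P : Int) (hn : 0 < n) (hs : s = PySem.Int.mod (m - 1) n)
    (hP : P = n / (Int.gcd n s : Int))
    (fuel : Nat) (j : Int) (arr : List Int) (hj0 : 0 ≤ j) (hjP : j < P)
    (hf : (P - j).toNat ≤ fuel) :
    genLoopA n m fuel (pvF n s j) arr = arr ++ (PySem.List.pyRange (j + 1) P 1).map (pvF n s) := by
  have hsmod : s = (m - 1) % n := by rw [hs, PySem.Int.mod_eq_emod_of_pos hn]
  have hs0 : 0 ≤ s := by rw [hsmod]; exact Int.emod_nonneg _ (by omega)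
  have hone : ∀ k : Int, pvF n s k = 1 ↔ P ∣ k := by
    intro k
    rw [pv_f_eq_one_iff n s k hn, pv_dvd_iff n s k hn hs0, hP]
  induction fuel generalizing j arr with
  | zero => omega
  | succ f ih =>
    simp only [genLoopA]
    have hmod : PySem.Int.mod (pvF n s j + m - 1) n = (1 + (j + 1) * s) % n := by
      rw [PySem.Int.mod_eq_emod_of_pos hn]
      exact pv_step n m s j hn hsmod
    have hni2 : (if (PySem.Int.mod (pvF n s j + m - 1) n) = 0 then n
        else PySem.Int.mod (pvF n s j + m - 1) n) = pvF n s (j + 1) := by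
      rw [hmod]; unfold pvF; rfl
    rw [hni2]
    by_cases hend : j + 1 = P
    · have h1 : pvF n s (j + 1) = 1 := (hone (j + 1)).mpr (hend ▸ dvd_rfl)
      rw [h1]
      simp only [if_true]
      rw [hend, PySem.List.pyRange_one_eq_nil (le_refl P)]
      simp
    · have hlt : j + 1 < P := by omega
      have h1 : pvF n s (j + 1) ≠ 1 := by
        intro h
        have hdvd := (hone (j + 1)).mp h
        have := Int.le_of_dvd (by omega) hdvd
        omega
      rw [if_neg h1]
      rw [ih (j + 1) (arr ++ [pvF n s (j + 1)]) (by omega) hlt (by omega)]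
      rw [PySem.List.pyRange_one_cons hlt]
      simp

theorem pv_main (n m : Int) (hn : 0 < n) : gen_arr n m = gen_arr_alt n m := by
  set s : Int := PySem.Int.mod (m - 1) n with hs
  have hsmod : s = (m - 1) % n := by rw [hs, PySem.Int.mod_eq_emod_of_pos hn]
  have hs0 : 0 ≤ s := by rw [hsmod]; exact Int.emod_nonneg _ (by omega)
  have hG : euclidLoop (s.toNat + 1) n s = (Int.gcd n s : Int) :=
    pv_euclid (s.toNat + 1) n s (by omega) hs0 (by omega)
  have hGpos : 0 < Int.gcd n s := Int.gcd_pos_of_ne_zero_left s (by omega)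
  have hGpos' : (0:Int) < (Int.gcd n s : Int) := by exact_mod_cast hGpos
  set P : Int := n / (Int.gcd n s : Int) with hP
  have hPdiv : PySem.Int.floordiv n (Int.gcd n s : Int) = P :=
    (PySem.Int.floordiv_eq_ediv_of_pos hGpos').trans hP.symm
  have hPpos : 0 < P := by
    rw [hP]
    exact Int.ediv_pos_of_pos_of_dvd hn (by omega) (Int.gcd_dvd_left n s)
  have hPn : P ≤ n := by
    rw [hP]
    exact Int.ediv_le_self _ (by omega)
  have halt : gen_arr_alt n m =
      (PySem.List.pyRange 0 (PySem.Int.floordiv n (euclidLoop (s.toNat + 1) n s)) 1).map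
        (fun i => let r := PySem.Int.mod (1 + i * s) n; if r = 0 then n else r) := rfl
  have hfun : (fun i => let r := PySem.Int.mod (1 + i * s) n; if r = 0 then n else r) = pvF n s := by
    funext i
    simp only [pvF, PySem.Int.mod_eq_emod_of_pos hn]
  rw [halt, hG, hPdiv, hfun]
  unfold gen_arr
  have hf0 : pvF n s 0 = 1 := pv_f_zero n s hn
  have hloop := pv_loop n m s P hn hs hP (n.toNat + 1) 0 [1] (le_refl 0) hPpos (by omega)
  rw [hf0] at hloop
  rw [hloop]
  rw [PySem.List.pyRange_one_cons hPpos]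
  simp [hf0]

-- ===== VERDICT (by name: the statement is the Claim_ definition above) =====
theorem gen_arr_spec : Claim_equal_gen_arr := by
  intro n m _ hpre
  unfold Spec_gen_arr
  exact pv_main n m (by exact hpre)
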